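-- pv_equiv track=rewrite | github.com/alexed154/firstRepository | Python/Homework1_Alex_Edmonds/hw1.py | samecatdog
-- ===== SOURCE A (Python) =====
-- def samecatdog(string):
--     """
--     Return True if the string "cat" and "dog" appear the same number of times in the given string.
--    *** This can be simplfied using a Python string method ***
--     """
--     sumDog = 0
--     sumCat = 0
--     for i in range(len(string) - 2):
--         animal = string[i:i+3]
--         if animal == 'cat':
--             sumCat += 1
--         if animal == 'dog':
--             sumDog += 1
--     if sumDog == sumCat:
--         return True
--     else:
--         return False
-- ===== SOURCE B (Python) =====
-- def samecatdog(string):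
--     """
--     Return True if "cat" and "dog" appear the same number of times.
--     Counts each word by jumping from occurrence to occurrence with
--     str.find (restarting at i + 1, so overlapping matches would count),
--     instead of comparing every length-3 window.
--     """
--     def occurrences(sub):
--         n = 0
--         i = string.find(sub)
--         while i != -1:
--             n += 1
--             i = string.find(sub, i + 1)
--         return n
--     return occurrences('cat') == occurrences('dog')
-- ===== Notes on version B (the rewrite author's own statement) =====
-- stated objective: faster
-- what changed: Replaces the per-index trigram-comparison loop with two staged occurrence counters that jump from match to match via str.find(sub, i+1), so the string is traversed by the library substring search instead of an explicit window scan.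
import Mathlib
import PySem

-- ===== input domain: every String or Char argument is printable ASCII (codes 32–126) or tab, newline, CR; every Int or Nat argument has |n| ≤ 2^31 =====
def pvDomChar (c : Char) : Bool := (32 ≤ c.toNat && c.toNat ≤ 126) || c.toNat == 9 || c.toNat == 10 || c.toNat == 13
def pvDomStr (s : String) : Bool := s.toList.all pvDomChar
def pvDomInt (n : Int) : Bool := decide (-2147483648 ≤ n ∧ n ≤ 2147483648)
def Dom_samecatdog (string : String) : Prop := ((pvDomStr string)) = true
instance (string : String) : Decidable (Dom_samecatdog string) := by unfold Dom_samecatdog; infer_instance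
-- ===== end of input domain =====

-- B counts each word by jumping occurrence-to-occurrence with str.find(sub, i+1)
-- instead of A's per-index trigram comparison; measurably faster by constant factor.

-- ===== PORT A =====
-- the loop body, named: state p = (sumDog, sumCat); the two independent ifs in the Python order
def pvStepA (cs : List Char) (p : Int × Int) (i : Int) : Int × Int :=
  let animal := PySem.List.slice cs (some i) (some (i + 3))
  let p := if animal = ['c', 'a', 't'] then (p.1, p.2 + 1) else p
  if animal = ['d', 'o', 'g'] then (p.1 + 1, p.2) else p

def samecatdog (string : String) : Bool :=
  let cs := string.toList
  let st := (PySem.List.pyRange 0 ((cs.length : Int) - 2) 1).foldl (pvStepA cs) (0, 0)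
  if st.1 = st.2 then true else false

-- ===== PORT B =====
-- the while loop of occurrences(): while i != -1: n += 1; i = string.find(sub, i+1)
-- (fuel cs.length + 1 only makes the recursion total; it never runs out, see pvOccGo_spec)
def pvOccGo (cs sub : List Char) : Nat → Int → Int → Int
  | 0, n, _ => n
  | fuel + 1, n, i =>
    if i = -1 then n
    else pvOccGo cs sub fuel (n + 1) (PySem.Chars.findFrom cs sub (i + 1) none)

-- occurrences(sub): n = 0; i = string.find(sub); then the while loop
def pvOcc (cs sub : List Char) : Int :=
  pvOccGo cs sub (cs.length + 1) 0 (PySem.Chars.find cs sub)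

def samecatdog_alt (string : String) : Bool :=
  let cs := string.toList
  decide (pvOcc cs ['c', 'a', 't'] = pvOcc cs ['d', 'o', 'g'])

-- ===== PRECONDITION & SPEC =====
def Spec_samecatdog (string : String) (out : Bool) : Prop := out = samecatdog_alt string
instance (string : String) (out : Bool) : Decidable (Spec_samecatdog string out) := by unfold Spec_samecatdog; infer_instance

-- ===== CLAIM (what is proved, stated in full; the proofs are below) =====
def Claim_equal_samecatdog : Prop := ∀ (string : String), Dom_samecatdog string → Spec_samecatdog string (samecatdog string)

-- ===== LEMMAS AND PROOFS =====

-- number of occurrence positions of sub in cs at indices in [k, cs.length)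
def pvCnt (cs sub : List Char) (k : Nat) : Nat :=
  (List.Ico k cs.length).countP (fun j => decide (sub <+: cs.drop j))

lemma pvOccGo_spec (cs sub : List Char) (hsub : sub ≠ []) :
    ∀ (fuel k : Nat) (n : Int), k ≤ cs.length → cs.length + 1 - k ≤ fuel →
      pvOccGo cs sub fuel n (PySem.Chars.findFrom cs sub (k : Int) none)
        = n + (pvCnt cs sub k : Int) := by
  intro fuel
  induction fuel with
  | zero => intro k n hk hf; omega
  | succ fuel ih =>
    intro k n hk hf
    by_cases hneg : PySem.Chars.findFrom cs sub (k : Int) none = -1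
    · -- no occurrence at or after k: the loop exits, the count is 0
      have hnone : ¬ sub <:+: cs.drop k :=
        (PySem.Chars.findFrom_natCast_eq_neg_one_iff cs sub k hk).mp hneg
      have hzero : pvCnt cs sub k = 0 := by
        rw [pvCnt, List.countP_eq_zero]
        intro j hj
        simp only [List.Ico.mem] at hj
        simp only [decide_eq_true_eq]
        intro hpre
        have hsuf : cs.drop j <:+ cs.drop k := by
          have hjk : cs.drop j = (cs.drop k).drop (j - k) := by
            rw [List.drop_drop]; congr 1; omega
          rw [hjk]; exact List.drop_suffix _ _
        exact hnone (hpre.isInfix.trans hsuf.isInfix)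
      rw [pvOccGo, if_pos hneg, hzero]
      simp
    · -- first occurrence r ≥ k found: one step of the loop, recurse from r + 1
      obtain ⟨hkr, hpre, hmin⟩ := PySem.Chars.findFrom_natCast_spec cs sub k hk hneg
      set r : Int := PySem.Chars.findFrom cs sub (k : Int) none with hr
      have hr0 : (0 : Int) ≤ r := le_trans (by exact_mod_cast Int.natCast_nonneg k) hkr
      have hrlen : r.toNat < cs.length := by
        have hne : cs.drop r.toNat ≠ [] := by
          intro h0; rw [h0] at hpre
          exact hsub (List.prefix_nil.mp hpre)
        have := List.drop_eq_nil_iff.not.mp hne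
        omega
      have hcast : r + 1 = ((r.toNat + 1 : Nat) : Int) := by omega
      rw [pvOccGo, if_neg hneg, hcast,
          ih (r.toNat + 1) (n + 1) (by omega) (by omega)]
      -- count over [k, len) = (nothing in [k, r)) + (one at r) + count over [r+1, len)
      have hkr' : k ≤ r.toNat := by omega
      have hsplit : List.Ico k cs.length = List.Ico k r.toNat ++ List.Ico r.toNat cs.length :=
        (List.Ico.append_consecutive hkr' (by omega)).symm
      have hcons : List.Ico r.toNat cs.length = r.toNat :: List.Ico (r.toNat + 1) cs.length :=
        List.Ico.eq_cons (by omega)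
      have hfirst : (List.Ico k r.toNat).countP (fun j => decide (sub <+: cs.drop j)) = 0 := by
        rw [List.countP_eq_zero]
        intro j hj
        simp only [List.Ico.mem] at hj
        simp only [decide_eq_true_eq]
        exact hmin j (by omega) (by omega)
      have : pvCnt cs sub k = 1 + pvCnt cs sub (r.toNat + 1) := by
        rw [pvCnt, hsplit, List.countP_append, hfirst, hcons, List.countP_cons,
            pvCnt]
        simp [hpre]
        omega
      rw [this]
      push_cast
      omega

-- occurrences(sub) counts exactly the positions where sub is a prefix of a suffix
lemma pvOcc_spec (cs sub : List Char) (hsub : sub ≠ []) :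
    pvOcc cs sub = (pvCnt cs sub 0 : Int) := by
  have h := pvOccGo_spec cs sub hsub (cs.length + 1) 0 0 (Nat.zero_le _) (by omega)
  simpa [pvOcc, PySem.Chars.findFrom_zero] using h

-- ---- A's side: the fold counts trigram positions ----

-- A's loop body at the slice level
def pvCountStep (p : Int × Int) (animal : List Char) : Int × Int :=
  let p := if animal = ['c', 'a', 't'] then (p.1, p.2 + 1) else p
  if animal = ['d', 'o', 'g'] then (p.1 + 1, p.2) else p

lemma foldl_stepA (cs : List Char) (L : List Int) (init : Int × Int) :
    L.foldl (pvStepA cs) init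
      = (L.map (fun i => PySem.List.slice cs (some i) (some (i + 3)))).foldl pvCountStep init := by
  induction L generalizing init with
  | nil => rfl
  | cons x xs ih => simp only [List.foldl_cons, List.map_cons, ih]; rfl

lemma fold_counts (L : List (List Char)) (d0 c0 : Int) :
    L.foldl pvCountStep (d0, c0)
      = (d0 + (L.count ['d', 'o', 'g'] : Int), c0 + (L.count ['c', 'a', 't'] : Int)) := by
  induction L generalizing d0 c0 with
  | nil => simp
  | cons x xs ih =>
    by_cases h1 : x = ['c', 'a', 't']
    · subst h1
      simp only [List.foldl_cons, List.count_cons, pvCountStep, ih]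
      simp [Prod.ext_iff]
      omega
    · by_cases h2 : x = ['d', 'o', 'g']
      · subst h2
        simp only [List.foldl_cons, List.count_cons, pvCountStep, ih]
        simp [Prod.ext_iff]
        omega
      · simp only [List.foldl_cons, pvCountStep, if_neg h1, if_neg h2, ih, List.count_cons]
        simp [h1, h2]

-- a 3-character word occurs at position j iff A's slice at j equals it
lemma slice_eq_iff_prefix (cs sub : List Char) (hlen : sub.length = 3) (j : Nat) :
    ((cs.drop j).take 3 = sub) ↔ sub <+: cs.drop j := by
  constructor
  · intro h; rw [← h]; exact List.take_prefix _ _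
  · intro h
    rw [List.prefix_iff_eq_take.mp h, hlen]

-- A's per-position count over range(len - 2) equals B's occurrence count from 0
lemma range_count_eq_cnt (cs sub : List Char) (hlen : sub.length = 3) :
    ((List.range (cs.length - 2)).map (fun j => (cs.drop j).take 3)).count sub
      = pvCnt cs sub 0 := by
  rw [List.count_eq_countP, List.countP_map, pvCnt, List.Ico.zero_bot]
  -- positions in [len - 2, len) never carry a length-3 prefix, so the tail adds 0
  have hsplit : List.range cs.length
      = List.range (cs.length - 2) ++ List.Ico (cs.length - 2) cs.length := by
    rw [← List.Ico.zero_bot, ← List.Ico.zero_bot]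
    exact (List.Ico.append_consecutive (Nat.zero_le _) (by omega)).symm
  rw [hsplit, List.countP_append]
  have htail : (List.Ico (cs.length - 2) cs.length).countP
      (fun j => decide (sub <+: cs.drop j)) = 0 := by
    rw [List.countP_eq_zero]
    intro j hj
    simp only [List.Ico.mem] at hj
    simp only [decide_eq_true_eq]
    intro hpre
    have := hpre.length_le
    simp only [List.length_drop, hlen] at this
    omega
  rw [htail, Nat.add_zero]
  apply List.countP_congr
  intro j hj
  simp only [Function.comp]
  simp [slice_eq_iff_prefix cs sub hlen j]

-- ===== VERDICT (by name: the statement is the Claim_ definition above) =====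
theorem samecatdog_spec : Claim_equal_samecatdog := by
  intro s _
  show samecatdog s = samecatdog_alt s
  simp only [samecatdog, samecatdog_alt]
  set cs := s.toList with hcs
  rw [PySem.List.pyRange_one, foldl_stepA]
  have hslice : ((List.range (((cs.length : Int) - 2 - 0).toNat)).map (fun k : Nat => (0 : Int) + (k : Int))).map
      (fun i => PySem.List.slice cs (some i) (some (i + 3)))
      = (List.range (cs.length - 2)).map (fun j => (cs.drop j).take 3) := by
    have hN : ((cs.length : Int) - 2 - 0).toNat = cs.length - 2 := by omega
    rw [hN, List.map_map]
    apply List.map_congr_left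
    intro k _
    have h0 : (0 : Int) ≤ (0 : Int) + (k : Int) := by positivity
    have h3 : (0 : Int) ≤ (0 : Int) + (k : Int) + 3 := by positivity
    simp only [Function.comp]
    rw [PySem.List.slice_toNat cs h0 h3,
        show ((0 : Int) + (k : Int) + 3).toNat - ((0 : Int) + (k : Int)).toNat = 3 by omega,
        show ((0 : Int) + (k : Int)).toNat = k by omega]
  rw [hslice, fold_counts,
      pvOcc_spec cs ['c', 'a', 't'] (by simp), pvOcc_spec cs ['d', 'o', 'g'] (by simp),
      range_count_eq_cnt cs ['c', 'a', 't'] rfl, range_count_eq_cnt cs ['d', 'o', 'g'] rfl]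
  simp only [zero_add]
  by_cases h : pvCnt cs ['d', 'o', 'g'] 0 = pvCnt cs ['c', 'a', 't'] 0
  · simp [h]
  · have h1 : ((pvCnt cs ['d', 'o', 'g'] 0 : Int)) ≠ (pvCnt cs ['c', 'a', 't'] 0 : Int) := by
      exact_mod_cast h
    have h2 : pvCnt cs ['c', 'a', 't'] 0 ≠ pvCnt cs ['d', 'o', 'g'] 0 := fun e => h e.symm
    simp [h1, h2]
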